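-- pv_equiv track=rewrite | github.com/KalBartal/Find-the-Most-Common-Value-in-a-Dictionary | main.py | find_most_common_value
-- ===== SOURCE A (Python) =====
-- def find_most_common_value(dictionary):
--     freq_dict = {}
--     max_freq = 0
--     max_val = None
--     for key in dictionary:
--         if dictionary[key] not in freq_dict:
--             freq_dict[dictionary[key]] = 1
--         else:
--             freq_dict[dictionary[key]] += 1
--         if freq_dict[dictionary[key]] > max_freq:
--             max_freq = freq_dict[dictionary[key]]
--             max_val = dictionary[key]
--     return max_val
-- ===== SOURCE B (Python) =====
-- def find_most_common_value(dictionary):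
--     values = list(dictionary.values())
--     if not values:
--         return None
--     counts = {}
--     for v in values:
--         counts[v] = counts.get(v, 0) + 1
--     m = max(counts.values())
--     running = {}
--     for v in values:
--         running[v] = running.get(v, 0) + 1
--         if running[v] == m:
--             return v
--     return None  # unreachable: some value reaches the maximum count
-- ===== Notes on version B (the rewrite author's own statement) =====
-- stated objective: alternative
-- what changed: A tracks the running maximum and winner inside one pass with a strict-greater update; B first builds the full frequency table and its maximum M, then a second pass returns the first value whose running count reaches M (same tie-break: the value whose M-th occurrence comes earliest).
import Mathlib
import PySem

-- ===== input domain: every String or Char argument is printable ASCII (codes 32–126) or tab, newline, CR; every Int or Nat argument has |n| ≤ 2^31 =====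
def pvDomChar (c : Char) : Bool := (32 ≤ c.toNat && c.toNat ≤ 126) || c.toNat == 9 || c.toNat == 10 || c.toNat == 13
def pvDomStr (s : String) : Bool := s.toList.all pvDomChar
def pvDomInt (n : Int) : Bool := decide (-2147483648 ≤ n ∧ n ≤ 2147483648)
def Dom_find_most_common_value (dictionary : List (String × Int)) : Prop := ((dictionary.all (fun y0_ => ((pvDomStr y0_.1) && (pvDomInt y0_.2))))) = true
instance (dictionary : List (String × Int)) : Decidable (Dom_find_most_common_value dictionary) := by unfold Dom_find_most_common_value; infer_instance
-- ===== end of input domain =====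

-- B replaces A's single-pass running-max update by a different decomposition (same cost):
-- build the full frequency table and its maximum M first, then a second pass returns the
-- first value whose running count reaches M (same result, including A's tie-break).

-- ===== PORT A =====
-- one pass over the dict's keys: running frequency dict, strict-greater max update
def find_most_common_value (dictionary : List (String × Int)) : Option Int :=
  let d := PySem.Dict.mk dictionary
  let st := d.keys.foldl
    (fun (st : PySem.Dict Int Int × Int × Option Int) key =>
      let v := (d.get? key).getD 0      -- dictionary[key]; the iterated key is present
      let freq_dict := if st.1.contains v = false then st.1.insert v 1
                       else st.1.modify v 0 (· + 1)
      let c := freq_dict.getD v 0       -- freq_dict[dictionary[key]]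
      if c > st.2.1 then (freq_dict, c, some v) else (freq_dict, st.2.1, st.2.2))
    (PySem.Dict.empty, 0, none)
  st.2.2

-- ===== PORT B =====
-- second loop of Source B (early return): first value whose running count reaches m
def bScan (values : List Int) (m : Int) (running : PySem.Dict Int Int) : Option Int :=
  match values with
  | [] => none
  | v :: rest =>
    let running := running.insert v (running.getD v 0 + 1)
    if running.getD v 0 == m then some v else bScan rest m running

def find_most_common_value_alt (dictionary : List (String × Int)) : Option Int :=
  let values := dictionary.map (·.2)
  if values.isEmpty then none
  else
    let counts := values.foldl (fun d v => d.insert v (d.getD v 0 + 1)) PySem.Dict.empty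
    match PySem.List.max? counts.values (fun x => x) with
    | none => none                      -- unreachable: counts is nonempty here
    | some m => bScan values m PySem.Dict.empty

-- ===== PRECONDITION & SPEC =====
-- Pre_ excludes only association lists with duplicate keys: a Python dict always has
-- distinct keys, so such lists represent no actual input of A (no port is faithful there).
def Pre_find_most_common_value (dictionary : List (String × Int)) : Prop :=
  (dictionary.map Prod.fst).Nodup
instance (dictionary : List (String × Int)) : Decidable (Pre_find_most_common_value dictionary) := by
  unfold Pre_find_most_common_value; infer_instance

def pvWitness_find_most_common_value : (List (String × Int)) := [("a", 1), ("b", 2), ("c", 1)]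

def Spec_find_most_common_value (dictionary : List (String × Int)) (out : Option Int) : Prop := out = find_most_common_value_alt dictionary
instance (dictionary : List (String × Int)) (out : Option Int) : Decidable (Spec_find_most_common_value dictionary out) := by unfold Spec_find_most_common_value; infer_instance

-- ===== CLAIM (what is proved, stated in full; the proofs are below) =====
def Claim_equal_find_most_common_value : Prop := ∀ (dictionary : List (String × Int)), Dom_find_most_common_value dictionary → Pre_find_most_common_value dictionary → Spec_find_most_common_value dictionary (find_most_common_value dictionary)

-- ===== LEMMAS AND PROOFS =====

-- pure (dict-free) versions of the two loops over the list of values; p is the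
-- already-processed prefix, so running counts become List.count over p
def pureA : List Int → List Int → Int → Option Int → Int × Option Int
  | [], _, mf, mv => (mf, mv)
  | v :: rest, p, mf, mv =>
    if ((p.count v : Int) + 1) > mf then pureA rest (p ++ [v]) ((p.count v : Int) + 1) (some v)
    else pureA rest (p ++ [v]) mf mv

def pureScan : List Int → List Int → Int → Option Int
  | [], _, _ => none
  | v :: rest, p, m =>
    if ((p.count v : Int) + 1) == m then some v else pureScan rest (p ++ [v]) m

-- maximum multiplicity of a list
def maxc (p : List Int) : Int := (p.map (fun v => (p.count v : Int))).foldr max 0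

lemma le_fm {l : List Int} {b y : Int} (h : y ∈ l) : y ≤ l.foldr max b := by
  induction l with
  | nil => cases h
  | cons a t ih =>
    rcases List.mem_cons.mp h with h | h
    · subst h; exact le_max_left _ _
    · exact le_trans (ih h) (le_max_right _ _)

lemma b_le_fm (l : List Int) (b : Int) : b ≤ l.foldr max b := by
  induction l with
  | nil => exact le_refl _
  | cons a t ih => exact le_trans ih (le_max_right _ _)

lemma fm_le {l : List Int} {b B : Int} (hb : b ≤ B) (h : ∀ y ∈ l, y ≤ B) :
    l.foldr max b ≤ B := by
  induction l with
  | nil => exact hb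
  | cons a t ih =>
    exact max_le (h a (by simp)) (ih (fun y hy => h y (by simp [hy])))

lemma fm_mem_or (l : List Int) (b : Int) : l.foldr max b = b ∨ l.foldr max b ∈ l := by
  induction l with
  | nil => exact Or.inl rfl
  | cons a t ih =>
    simp only [List.foldr_cons]
    rcases le_total (t.foldr max b) a with h | h
    · right; rw [max_eq_left h]; exact List.mem_cons_self
    · rw [max_eq_right h]
      rcases ih with h' | h'
      · left; exact h'
      · right; exact List.mem_cons_of_mem _ h'

lemma maxc_nonneg (p : List Int) : 0 ≤ maxc p := b_le_fm _ _

lemma count_le_maxc (p : List Int) (x : Int) : (p.count x : Int) ≤ maxc p := by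
  by_cases hx : x ∈ p
  · exact le_fm (List.mem_map.mpr ⟨x, hx, rfl⟩)
  · have h0 : p.count x = 0 := List.count_eq_zero.mpr hx
    rw [h0]; simpa using maxc_nonneg p

lemma maxc_attained {p : List Int} (h : p ≠ []) : ∃ x ∈ p, (p.count x : Int) = maxc p := by
  rcases fm_mem_or (p.map (fun v => (p.count v : Int))) 0 with h0 | hmem
  · exfalso
    cases p with
    | nil => exact h rfl
    | cons a t =>
      have h1 : ((a :: t).count a : Int) ≤ maxc (a :: t) := count_le_maxc _ a
      have h2 : 0 < (a :: t).count a := List.count_pos_iff.mpr List.mem_cons_self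
      have h3 : maxc (a :: t) = 0 := h0
      omega
  · rcases List.mem_map.mp hmem with ⟨x, hx, hcx⟩
    exact ⟨x, hx, hcx⟩

lemma count_append_singleton (p : List Int) (v x : Int) :
    ((p ++ [v]).count x : Int) = (p.count x : Int) + (if x = v then 1 else 0) := by
  rw [List.count_append]
  by_cases h : x = v
  · subst h; simp
  · have h0 : List.count x [v] = 0 := by
      simp [List.count_eq_zero, h]
    rw [h0, if_neg h]; push_cast; ring

lemma maxc_append_singleton (p : List Int) (v : Int) :
    maxc (p ++ [v]) = max (maxc p) ((p.count v : Int) + 1) := by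
  have hnn := maxc_nonneg p
  apply le_antisymm
  · apply fm_le
    · omega
    · intro y hy
      rcases List.mem_map.mp hy with ⟨x, hx, rfl⟩
      rw [count_append_singleton]
      by_cases hxv : x = v
      · rw [if_pos hxv, hxv]; omega
      · have hle : (p.count x : Int) ≤ maxc p := count_le_maxc p x
        rw [if_neg hxv]; omega
  · have h1 : ((p ++ [v]).count v : Int) ≤ maxc (p ++ [v]) := count_le_maxc _ v
    rw [count_append_singleton, if_pos rfl] at h1
    apply max_le
    · apply fm_le
      · have := maxc_nonneg (p ++ [v]); omega
      · intro y hy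
        rcases List.mem_map.mp hy with ⟨x, hx, rfl⟩
        have h2 : ((p ++ [v]).count x : Int) ≤ maxc (p ++ [v]) := count_le_maxc _ x
        rw [count_append_singleton] at h2
        split_ifs at h2 <;> omega
    · omega

lemma scan_append_of_some {a : List Int} {q : List Int} {m x : Int}
    (h : pureScan a q m = some x) (b : List Int) : pureScan (a ++ b) q m = some x := by
  induction a generalizing q with
  | nil => simp [pureScan] at h
  | cons v rest ih =>
    rw [pureScan] at h
    rw [List.cons_append, pureScan]
    split_ifs at h ⊢ with hc
    · exact h
    · exact ih h

lemma scan_append_of_none {a : List Int} {q : List Int} {m : Int}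
    (h : pureScan a q m = none) (b : List Int) :
    pureScan (a ++ b) q m = pureScan b (q ++ a) m := by
  induction a generalizing q with
  | nil => rw [List.nil_append, List.append_nil]
  | cons v rest ih =>
    rw [pureScan] at h
    rw [List.cons_append, pureScan]
    split_ifs at h ⊢ with hc
    rw [ih h, List.append_assoc, List.singleton_append]

lemma scan_some {l : List Int} {m : Int} :
    ∀ q, (∃ v ∈ l, ((q ++ l).count v : Int) = m) → ∃ x, pureScan l q m = some x := by
  induction l with
  | nil => rintro q ⟨v, hv, _⟩; cases hv
  | cons v rest ih =>
    rintro q ⟨w, hw, hcw⟩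
    rw [pureScan]
    split_ifs with hc
    · exact ⟨v, rfl⟩
    · apply ih (q ++ [v])
      have hvne : ((q.count v : Int) + 1) ≠ m := by
        intro he; exact hc (by simpa using he)
      rcases List.mem_cons.mp hw with hw | hw
      · subst hw
        by_cases hr : w ∈ rest
        · refine ⟨w, hr, ?_⟩
          rw [show q ++ [w] ++ rest = q ++ w :: rest by simp]
          exact hcw
        · exfalso
          apply hvne
          rw [List.count_append] at hcw
          have h0 : rest.count w = 0 := List.count_eq_zero.mpr hr
          rw [List.count_cons_self, h0] at hcw
          push_cast at hcw ⊢
          omega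
      · refine ⟨w, hw, ?_⟩
        rw [show q ++ [v] ++ rest = q ++ v :: rest by simp]
        exact hcw

lemma scan_count_ge {l : List Int} {m x : Int} :
    ∀ q, pureScan l q m = some x → m ≤ ((q ++ l).count x : Int) := by
  induction l with
  | nil => intro q h; simp [pureScan] at h
  | cons v rest ih =>
    intro q h
    rw [pureScan] at h
    split_ifs at h with hc
    · obtain rfl : v = x := Option.some.inj h
      have hm : (q.count v : Int) + 1 = m := by simpa using hc
      rw [List.count_append, List.count_cons_self]
      push_cast; omega
    · have h2 := ih (q ++ [v]) h
      rw [show q ++ [v] ++ rest = q ++ v :: rest by simp] at h2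
      exact h2

lemma pureA_main (vs : List Int) :
    ∀ p, pureA vs p (maxc p) (pureScan p [] (maxc p)) =
      (maxc (p ++ vs), pureScan (p ++ vs) [] (maxc (p ++ vs))) := by
  induction vs with
  | nil => intro p; simp [pureA]
  | cons v rest ih =>
    intro p
    rw [pureA]
    have hmax := maxc_append_singleton p v
    split_ifs with h
    · have hm : maxc (p ++ [v]) = (p.count v : Int) + 1 := by
        rw [hmax]; exact max_eq_right (le_of_lt h)
      have hnone : pureScan p [] ((p.count v : Int) + 1) = none := by
        cases e : pureScan p [] ((p.count v : Int) + 1) with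
        | none => rfl
        | some x =>
          exfalso
          have h1 := scan_count_ge [] e
          simp only [List.nil_append] at h1
          have h2 := count_le_maxc p x
          omega
      have hs : pureScan (p ++ [v]) [] ((p.count v : Int) + 1) = some v := by
        rw [scan_append_of_none hnone]
        simp [pureScan]
      have hih := ih (p ++ [v])
      rw [hm, hs] at hih
      rw [show p ++ v :: rest = p ++ [v] ++ rest by simp]
      exact hih
    · have hle : (p.count v : Int) + 1 ≤ maxc p := by omega
      have hm : maxc (p ++ [v]) = maxc p := by
        rw [hmax]; exact max_eq_left hle
      have hp : p ≠ [] := by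
        intro he; subst he
        simp [maxc] at hle
      rcases maxc_attained hp with ⟨x, hx, hcx⟩
      rcases scan_some [] ⟨x, hx, by simpa using hcx⟩ with ⟨y, hy⟩
      have hs : pureScan (p ++ [v]) [] (maxc p) = some y := scan_append_of_some hy [v]
      have hih := ih (p ++ [v])
      rw [hm, hs] at hih
      rw [hy, show p ++ v :: rest = p ++ [v] ++ rest by simp]
      exact hih

lemma lookup_mem {l : List (String × Int)} {pr : String × Int}
    (hnd : (l.map Prod.fst).Nodup) (h : pr ∈ l) :
    (PySem.Dict.mk l).get? pr.1 = some pr.2 := by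
  induction l with
  | nil => cases h
  | cons a t ih =>
    rw [PySem.Dict.get?_mk_cons]
    rcases List.mem_cons.mp h with h | h
    · subst h; simp
    · have ha : ¬ (a.1 == pr.1) = true := by
        simp only [beq_iff_eq]
        intro he
        have hm : pr.1 ∈ t.map Prod.fst := List.mem_map.mpr ⟨pr, h, rfl⟩
        rw [← he] at hm
        exact (List.nodup_cons.mp (by simpa using hnd)).1 hm
      rw [if_neg ha]
      exact ih (List.nodup_cons.mp (by simpa using hnd)).2 h

lemma foldlA_eq_pureA (vs : List Int) :
    ∀ (freq : PySem.Dict Int Int) (p : List Int) (mf : Int) (mv : Option Int),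
      (∀ x, freq.getD x 0 = (p.count x : Int)) →
      (vs.foldl
        (fun (st : PySem.Dict Int Int × Int × Option Int) v =>
          let freq_dict := if st.1.contains v = false then st.1.insert v 1
                           else st.1.modify v 0 (· + 1)
          let c := freq_dict.getD v 0
          if c > st.2.1 then (freq_dict, c, some v) else (freq_dict, st.2.1, st.2.2))
        (freq, mf, mv)).2 = pureA vs p mf mv := by
  induction vs with
  | nil => intro freq p mf mv _; simp [pureA]
  | cons v rest ih =>
    intro freq p mf mv hfreq
    rw [List.foldl_cons, pureA]
    dsimp only
    have hgetD : ∀ x, (if freq.contains v = false then freq.insert v 1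
        else freq.modify v 0 (· + 1)).getD x 0 = ((p ++ [v]).count x : Int) := by
      intro x
      have hx := hfreq x
      have hv := hfreq v
      rw [count_append_singleton]
      by_cases hcv : freq.contains v = false
      · rw [if_pos hcv, PySem.Dict.getD_insert]
        have h0 : freq.getD v 0 = 0 := PySem.Dict.getD_of_not_contains _ _ hcv
        by_cases hxv : x = v
        · rw [if_pos hxv, if_pos hxv]; subst hxv; omega
        · rw [if_neg hxv, if_neg hxv]; omega
      · rw [if_neg hcv, PySem.Dict.getD_modify]
        by_cases hxv : x = v
        · rw [if_pos hxv, if_pos hxv]; subst hxv; omega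
        · rw [if_neg hxv, if_neg hxv]; omega
    have hc : (if freq.contains v = false then freq.insert v 1
        else freq.modify v 0 (· + 1)).getD v 0 = (p.count v : Int) + 1 := by
      rw [hgetD v, count_append_singleton, if_pos rfl]
    rw [hc]
    by_cases h : (p.count v : Int) + 1 > mf
    · rw [if_pos h, if_pos h]
      exact ih _ (p ++ [v]) _ _ hgetD
    · rw [if_neg h, if_neg h]
      exact ih _ (p ++ [v]) _ _ hgetD

lemma bScan_eq_pureScan (vs : List Int) :
    ∀ (running : PySem.Dict Int Int) (p : List Int) (m : Int),
      (∀ x, running.getD x 0 = (p.count x : Int)) →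
      bScan vs m running = pureScan vs p m := by
  induction vs with
  | nil => intro running p m _; rfl
  | cons v rest ih =>
    intro running p m hrun
    rw [bScan, pureScan]
    have hnew : ∀ x, (running.insert v (running.getD v 0 + 1)).getD x 0
        = ((p ++ [v]).count x : Int) := by
      intro x
      rw [PySem.Dict.getD_insert, count_append_singleton]
      have hx := hrun x
      have hv := hrun v
      by_cases hxv : x = v
      · rw [if_pos hxv, if_pos hxv]; subst hxv; omega
      · rw [if_neg hxv, if_neg hxv]; omega
    have hcond : (running.insert v (running.getD v 0 + 1)).getD v 0 = (p.count v : Int) + 1 := by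
      rw [hnew v, count_append_singleton, if_pos rfl]
    rw [hcond]
    by_cases h : ((p.count v : Int) + 1) == m
    · rw [if_pos h, if_pos h]
    · rw [if_neg h, if_neg h]
      exact ih _ (p ++ [v]) m hnew

lemma max_counter_values {vs : List Int} (h : vs ≠ []) :
    PySem.List.max? (PySem.Dict.values (PySem.Dict.counter vs)) (fun x => x) = some (maxc vs) := by
  have hvals : (PySem.Dict.counter vs).values
      = (PySem.Set.ofList vs).map (fun k => (vs.count k : Int)) := by
    show ((PySem.Dict.counter vs).items).map Prod.snd = _
    rw [PySem.Dict.items_counter]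
    simp [List.map_map, Function.comp]
  cases e : PySem.List.max? (PySem.Dict.values (PySem.Dict.counter vs)) (fun x => x) with
  | none =>
    exfalso
    have he := (PySem.List.max?_eq_none_iff _ _).mp e
    rw [hvals] at he
    cases vs with
    | nil => exact h rfl
    | cons a t =>
      have hm : a ∈ PySem.Set.ofList (a :: t) := (PySem.Set.mem_ofList _ _).mpr List.mem_cons_self
      simp_all
  | some m' =>
    congr 1
    have hmem := PySem.List.max?_mem e
    have hmax := PySem.List.max?_isMax e
    rw [hvals] at hmem hmax
    rcases List.mem_map.mp hmem with ⟨k, hk, rfl⟩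
    apply le_antisymm
    · exact count_le_maxc vs k
    · rcases maxc_attained h with ⟨x, hx, hcx⟩
      have hle : ((vs.count x : Int) : Int) ≤ (vs.count k : Int) :=
        hmax _ (List.mem_map.mpr ⟨x, (PySem.Set.mem_ofList _ _).mpr hx, rfl⟩)
      omega

lemma ab_eq (dictionary : List (String × Int))
    (hpre : (dictionary.map Prod.fst).Nodup) :
    find_most_common_value dictionary = find_most_common_value_alt dictionary := by
  unfold find_most_common_value find_most_common_value_alt
  dsimp only
  have hkeys : (PySem.Dict.mk dictionary).keys = dictionary.map Prod.fst := by
    simp [PySem.Dict.keys]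
  rw [hkeys]
  have hstep1 : ((dictionary.map Prod.fst).foldl
      (fun (st : PySem.Dict Int Int × Int × Option Int) key =>
        let v := ((PySem.Dict.mk dictionary).get? key).getD 0
        let freq_dict := if st.1.contains v = false then st.1.insert v 1
                         else st.1.modify v 0 (· + 1)
        let c := freq_dict.getD v 0
        if c > st.2.1 then (freq_dict, c, some v) else (freq_dict, st.2.1, st.2.2))
      (PySem.Dict.empty, 0, none))
      = (dictionary.foldl
      (fun (st : PySem.Dict Int Int × Int × Option Int) pr =>
        let v := ((PySem.Dict.mk dictionary).get? pr.1).getD 0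
        let freq_dict := if st.1.contains v = false then st.1.insert v 1
                         else st.1.modify v 0 (· + 1)
        let c := freq_dict.getD v 0
        if c > st.2.1 then (freq_dict, c, some v) else (freq_dict, st.2.1, st.2.2))
      (PySem.Dict.empty, 0, none)) := List.foldl_map ..
  have hstep2 : (dictionary.foldl
      (fun (st : PySem.Dict Int Int × Int × Option Int) pr =>
        let v := ((PySem.Dict.mk dictionary).get? pr.1).getD 0
        let freq_dict := if st.1.contains v = false then st.1.insert v 1
                         else st.1.modify v 0 (· + 1)
        let c := freq_dict.getD v 0
        if c > st.2.1 then (freq_dict, c, some v) else (freq_dict, st.2.1, st.2.2))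
      (PySem.Dict.empty, 0, none))
      = (dictionary.foldl
      (fun (st : PySem.Dict Int Int × Int × Option Int) pr =>
        let v := pr.2
        let freq_dict := if st.1.contains v = false then st.1.insert v 1
                         else st.1.modify v 0 (· + 1)
        let c := freq_dict.getD v 0
        if c > st.2.1 then (freq_dict, c, some v) else (freq_dict, st.2.1, st.2.2))
      (PySem.Dict.empty, 0, none)) := by
    apply PySem.List.foldl_congr_mem
    intro acc x hx
    simp only [lookup_mem hpre hx, Option.getD_some]
  have hstep3 : (dictionary.foldl
      (fun (st : PySem.Dict Int Int × Int × Option Int) pr =>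
        let v := pr.2
        let freq_dict := if st.1.contains v = false then st.1.insert v 1
                         else st.1.modify v 0 (· + 1)
        let c := freq_dict.getD v 0
        if c > st.2.1 then (freq_dict, c, some v) else (freq_dict, st.2.1, st.2.2))
      (PySem.Dict.empty, 0, none))
      = ((dictionary.map (·.2)).foldl
      (fun (st : PySem.Dict Int Int × Int × Option Int) v =>
        let freq_dict := if st.1.contains v = false then st.1.insert v 1
                         else st.1.modify v 0 (· + 1)
        let c := freq_dict.getD v 0
        if c > st.2.1 then (freq_dict, c, some v) else (freq_dict, st.2.1, st.2.2))
      (PySem.Dict.empty, 0, none)) := (List.foldl_map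
        (f := fun pr : String × Int => pr.2)
        (g := fun (st : PySem.Dict Int Int × Int × Option Int) v =>
          let freq_dict := if st.1.contains v = false then st.1.insert v 1
                           else st.1.modify v 0 (· + 1)
          let c := freq_dict.getD v 0
          if c > st.2.1 then (freq_dict, c, some v) else (freq_dict, st.2.1, st.2.2))
        (l := dictionary) (init := (PySem.Dict.empty, 0, none))).symm
  rw [hstep1, hstep2, hstep3,
    foldlA_eq_pureA (dictionary.map (·.2)) PySem.Dict.empty [] 0 none
      (by intro x; simp [PySem.Dict.getD_empty])]
  by_cases hemp : (dictionary.map (·.2)).isEmpty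
  · rw [if_pos hemp]
    have hnil : dictionary.map (·.2) = [] := List.isEmpty_iff.mp hemp
    rw [hnil]
    rfl
  · rw [if_neg hemp]
    have hne : dictionary.map (·.2) ≠ [] := by simpa using hemp
    rw [PySem.Dict.foldl_insert_getD_add_one_eq_counter, max_counter_values hne]
    have hmain := pureA_main (dictionary.map (·.2)) []
    simp only [List.nil_append] at hmain
    rw [show maxc [] = 0 from rfl, show pureScan [] [] 0 = none from rfl] at hmain
    have hgoal : (pureA (dictionary.map (·.2)) [] 0 none).2
        = bScan (dictionary.map (·.2)) (maxc (dictionary.map (·.2))) PySem.Dict.empty := by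
      rw [bScan_eq_pureScan (dictionary.map (·.2)) PySem.Dict.empty []
        (maxc (dictionary.map (·.2))) (by intro x; simp [PySem.Dict.getD_empty]), hmain]
    exact hgoal


-- ===== VERDICT (by name: the statement is the Claim_ definition above) =====
theorem find_most_common_value_spec : Claim_equal_find_most_common_value := by
  intro dictionary _ hpre
  unfold Spec_find_most_common_value
  exact ab_eq dictionary hpre
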